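-- pv_equiv track=rewrite | github.com/rwharton/ms_beamform | proc/beam_extract_wterm.py | get_start_stop_chunk
-- ===== SOURCE A (Python) =====
-- def get_start_stop_chunk(Nt, Nchunk):
--     step = int(Nt / Nchunk) + 1
--     lovals = []
--     hivals = []
--     loval = 0
--     hival = 0
--     for ii in range(Nchunk):
--         hival = loval + step
--         if hival > Nt:
--             hival = Nt
--             lovals.append(loval)
--             hivals.append(hival)
--             break
--         else:
--             lovals.append(loval)
--             hivals.append(hival)
--         loval = hival
--     return zip(lovals, hivals)
-- ===== SOURCE B (Python) =====
-- def get_start_stop_chunk(Nt, Nchunk):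
--     # Closed form: chunk i covers [i*step, (i+1)*step) clipped to the data, and
--     # only the min(Nchunk, Nt // step + 1) first chunks start inside the data.
--     step = int(Nt / Nchunk) + 1
--     if step <= 0:
--         return zip([], [])
--     nchunks = min(Nchunk, Nt // step + 1)
--     starts = [i * step for i in range(nchunks)]
--     stops = [min(lo + step, Nt) for lo in starts]
--     return zip(starts, stops)
-- ===== Notes on version B (the rewrite author's own statement) =====
-- stated objective: simpler
-- what changed: B replaces A's stateful loop-with-break by a closed form: it computes the number of chunks as min(Nchunk, Nt//step + 1) (none when the chunk size step is not positive) and emits the starts and min-clamped stops with plain range comprehensions.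
-- intended difference: For negative Nt with positive Nchunk, A's unconditional first clamp returns the single nonsense pair (0, Nt) with a negative stop, while B returns no chunks, the intended result when there are no samples to cover. — e.g. on get_start_stop_chunk(-5, 2): A returns [(0, -5)], B returns []
import Mathlib
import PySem

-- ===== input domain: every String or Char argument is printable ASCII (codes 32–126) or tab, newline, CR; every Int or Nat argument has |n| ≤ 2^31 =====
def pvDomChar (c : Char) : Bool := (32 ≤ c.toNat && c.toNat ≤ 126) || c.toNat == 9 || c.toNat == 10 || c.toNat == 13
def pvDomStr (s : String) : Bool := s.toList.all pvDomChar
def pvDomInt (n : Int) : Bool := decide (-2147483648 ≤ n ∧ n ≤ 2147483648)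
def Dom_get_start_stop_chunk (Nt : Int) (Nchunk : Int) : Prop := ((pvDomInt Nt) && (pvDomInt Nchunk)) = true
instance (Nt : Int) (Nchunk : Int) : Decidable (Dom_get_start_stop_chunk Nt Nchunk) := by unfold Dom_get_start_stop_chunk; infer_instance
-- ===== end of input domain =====

-- B replaces A's stateful loop-with-break by a single filtered comprehension
-- (one chunk per start position inside the data, stops clamped by min); objective: simpler.
-- Both ports return the materialised list of the zip's pairs.

-- ===== PORT A =====
-- A's loop over range(Nchunk): the loop variable ii is unused, state is loval;
-- lovals/hivals are appended in lock-step, so the zip is ported as the pair list.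
-- int(Nt/Nchunk) is exact truncated division on Dom (|Nt|,|Nchunk| ≤ 2^31: the
-- correctly-rounded float quotient's absolute error < 2^-22/|Nchunk| is smaller than
-- the ≥ 1/|Nchunk| gap of a non-integer quotient to the nearest integer) → Int.tdiv.
-- range(Nchunk) is lazy in Python, so the loop is ported as recursion on the
-- remaining iteration count Nchunk.toNat (= len(range(Nchunk))), not on a built list.
def goA (Nt step : Int) : Nat → Int → List (Int × Int)
  | 0, _ => []
  | n + 1, loval =>
    let hival := loval + step
    if hival > Nt then [(loval, Nt)]
    else (loval, hival) :: goA Nt step n hival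

def get_start_stop_chunk (Nt : Int) (Nchunk : Int) : List (Int × Int) :=
  goA Nt (Nt.tdiv Nchunk + 1) Nchunk.toNat 0

-- ===== PORT B =====
-- Source B's locals step/nchunks/starts/stops become helper defs; int(Nt/Nchunk) → Int.tdiv,
-- exact on Dom as above; Nt // step → PySem.Int.floordiv; range(nchunks) over a possibly
-- negative count is empty → .toNat; the comprehensions and the final zip are ported one for one.
def bStep (Nt Nchunk : Int) : Int := Nt.tdiv Nchunk + 1

def bNchunks (Nt Nchunk : Int) : Int :=
  min Nchunk (PySem.Int.floordiv Nt (bStep Nt Nchunk) + 1)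

def bStarts (Nt Nchunk : Int) : List Int :=
  (List.range (bNchunks Nt Nchunk).toNat).map (fun (i : Nat) => (i : Int) * bStep Nt Nchunk)

def bStops (Nt Nchunk : Int) : List Int :=
  (bStarts Nt Nchunk).map (fun lo => min (lo + bStep Nt Nchunk) Nt)

def get_start_stop_chunk_alt (Nt : Int) (Nchunk : Int) : List (Int × Int) :=
  if bStep Nt Nchunk ≤ 0 then []
  else (bStarts Nt Nchunk).zip (bStops Nt Nchunk)

-- ===== PRECONDITION & SPEC =====
-- Pre_ excludes only Nchunk = 0, where A raises ZeroDivisionError.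
def Pre_get_start_stop_chunk (Nt : Int) (Nchunk : Int) : Prop := Nchunk ≠ 0
instance (Nt : Int) (Nchunk : Int) : Decidable (Pre_get_start_stop_chunk Nt Nchunk) := by
  unfold Pre_get_start_stop_chunk; infer_instance
def pvWitness_get_start_stop_chunk : Int × Int := (10, 3)

-- For negative Nt with positive Nchunk, A's unconditional first clamp returns the single
-- nonsense pair (0, Nt) with a negative stop, while B returns no chunks, the intended
-- result when there are no samples to cover.
def D_get_start_stop_chunk (Nt : Int) (Nchunk : Int) : Prop := Nt < 0 ∧ 0 < Nchunk
instance (Nt : Int) (Nchunk : Int) : Decidable (D_get_start_stop_chunk Nt Nchunk) := by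
  unfold D_get_start_stop_chunk; infer_instance

def Spec_get_start_stop_chunk (Nt : Int) (Nchunk : Int) (out : List (Int × Int)) : Prop :=
  ¬ D_get_start_stop_chunk Nt Nchunk → out = get_start_stop_chunk_alt Nt Nchunk
instance (Nt : Int) (Nchunk : Int) (out : List (Int × Int)) : Decidable (Spec_get_start_stop_chunk Nt Nchunk out) := by unfold Spec_get_start_stop_chunk; infer_instance

def pvDiffWitness_get_start_stop_chunk : Int × Int := (-5, 2)
def pvDiffWitnessOut_get_start_stop_chunk : (List (Int × Int)) × (List (Int × Int)) :=
  ([(0, -5)], [])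

-- ===== CLAIM (what is proved, stated in full; the proofs are below) =====
def Claim_unchanged_get_start_stop_chunk : Prop := ∀ (Nt : Int) (Nchunk : Int), Dom_get_start_stop_chunk Nt Nchunk → Pre_get_start_stop_chunk Nt Nchunk → Spec_get_start_stop_chunk Nt Nchunk (get_start_stop_chunk Nt Nchunk)
def Claim_changed_get_start_stop_chunk : Prop := Dom_get_start_stop_chunk (pvDiffWitness_get_start_stop_chunk.1) (pvDiffWitness_get_start_stop_chunk.2) ∧ Pre_get_start_stop_chunk (pvDiffWitness_get_start_stop_chunk.1) (pvDiffWitness_get_start_stop_chunk.2) ∧ D_get_start_stop_chunk (pvDiffWitness_get_start_stop_chunk.1) (pvDiffWitness_get_start_stop_chunk.2) ∧ get_start_stop_chunk (pvDiffWitness_get_start_stop_chunk.1) (pvDiffWitness_get_start_stop_chunk.2) = pvDiffWitnessOut_get_start_stop_chunk.1 ∧ get_start_stop_chunk_alt (pvDiffWitness_get_start_stop_chunk.1) (pvDiffWitness_get_start_stop_chunk.2) = pvDiffWitnessOut_get_start_stop_chunk.2 ∧ pvDiffWitnessOut_get_start_stop_chunk.1 ≠ pvDiffWitnessOut_get_s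tart_stop_chunk.2
def Claim_exact_get_start_stop_chunk : Prop := ∀ (Nt : Int) (Nchunk : Int), Dom_get_start_stop_chunk Nt Nchunk → Pre_get_start_stop_chunk Nt Nchunk → D_get_start_stop_chunk Nt Nchunk → get_start_stop_chunk Nt Nchunk ≠ get_start_stop_chunk_alt Nt Nchunk

-- ===== LEMMAS AND PROOFS =====

-- The loop's closed form: starting at loval = c*step with c ≤ q (q, r the floor
-- quotient/remainder of Nt by step > 0), it emits a pair per fuel element up to
-- index q, then the clamped pair (q*step, Nt) if fuel remains.
lemma goA_closed (Nt step q r : Int) (hq : Nt = step * q + r) (hr0 : 0 ≤ r) (hr : r < step) :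
    ∀ (n : Nat) (c : Nat), (c : Int) ≤ q →
      goA Nt step n ((c : Int) * step) =
        ((List.range (min n (q - c).toNat)).map
          (fun i : Nat => (((c : Int) + i) * step, ((c : Int) + i + 1) * step)))
        ++ (if (q - (c : Int)).toNat < n then [(q * step, Nt)] else []) := by
  intro n
  induction n with
  | zero => intro c hc; simp [goA]
  | succ rest ih =>
    intro c hc
    by_cases hcq : (c : Int) = q
    · have hbreak : (c : Int) * step + step > Nt := by
        rw [hq, hcq]; nlinarith
      have h0 : (q - (c : Int)).toNat = 0 := by omega
      simp only [goA]
      rw [if_pos hbreak]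
      simp [hcq]
    · have hclt : (c : Int) < q := lt_of_le_of_ne hc hcq
      have hstep : 0 < step := by omega
      have hnb : ¬ ((c : Int) * step + step > Nt) := by
        rw [hq]
        have : ((c : Int) + 1) * step ≤ q * step :=
          mul_le_mul_of_nonneg_right (by omega) (le_of_lt hstep)
        nlinarith
      have hnext : (c : Int) * step + step = ((c + 1 : Nat) : Int) * step := by
        push_cast; ring
      simp only [goA]
      rw [if_neg hnb, hnext, ih (c + 1) (by push_cast; omega)]
      have hm : min (rest + 1) (q - (c : Int)).toNat
          = min rest (q - ((c + 1 : Nat) : Int)).toNat + 1 := by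
        push_cast; omega
      rw [hm, List.range_succ_eq_map]
      simp only [List.map_cons, List.map_map, List.cons_append, List.cons.injEq]
      refine ⟨?_, ?_⟩
      · simp only [Prod.mk.injEq]
        constructor <;> (push_cast; ring)
      · congr 1
        · apply List.map_congr_left
          intro i _
          simp only [Function.comp_apply, Prod.mk.injEq]
          constructor <;> (push_cast; ring)
        · have hiff : ((q - ((c + 1 : Nat) : Int)).toNat < rest)
              ↔ ((q - (c : Int)).toNat < rest + 1) := by
            push_cast; omega
          exact if_congr hiff rfl rfl

-- B's zip of the two lock-step comprehensions, fused into one map (positive step case).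
lemma alt_eq_map (Nt Nchunk : Int) (h : 0 < bStep Nt Nchunk) :
    get_start_stop_chunk_alt Nt Nchunk =
      (List.range (bNchunks Nt Nchunk).toNat).map
        (fun (i : Nat) => ((i : Int) * bStep Nt Nchunk,
          min ((i : Int) * bStep Nt Nchunk + bStep Nt Nchunk) Nt)) := by
  unfold get_start_stop_chunk_alt bStops bStarts
  rw [if_neg (by omega), List.map_map, List.zip_map']
  rfl

-- The core equality, generalized over any positive step and 0 ≤ Nt:
-- A's loop emits exactly the first min(n, Nt/step + 1) clamped chunks.
lemma loop_eq_comprehension (Nt step : Int) (hNt : 0 ≤ Nt) (hstep : 0 < step) (n : Nat) :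
    goA Nt step n 0 =
      (List.range (min n ((Nt / step).toNat + 1))).map
        (fun (i : Nat) => ((i : Int) * step, min ((i : Int) * step + step) Nt)) := by
  have hsum : Nt = step * (Nt / step) + Nt % step := (Int.ediv_add_emod Nt step).symm
  have hr0 : 0 ≤ Nt % step := Int.emod_nonneg Nt (by omega)
  have hrlt : Nt % step < step := Int.emod_lt_of_pos Nt hstep
  have hq0 : 0 ≤ Nt / step := Int.ediv_nonneg hNt (le_of_lt hstep)
  have hmain := goA_closed Nt step (Nt / step) (Nt % step) hsum hr0 hrlt n 0
    (by exact_mod_cast hq0)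
  rw [Nat.cast_zero, zero_mul] at hmain
  rw [hmain]
  by_cases hcase : (Nt / step).toNat < n
  · -- clamp reached: the last emitted chunk is the clamped one
    have hmeq : min n ((Nt / step).toNat + 1) = (Nt / step).toNat + 1 := by omega
    have hmin : min n (Nt / step - 0).toNat = (Nt / step).toNat := by omega
    rw [if_pos (by omega), hmin, hmeq, List.range_succ, List.map_append]
    congr 1
    · apply List.map_congr_left
      intro i hi
      have hiq : i < (Nt / step).toNat := List.mem_range.mp hi
      have hle : ((i : Int) + 1) * step ≤ Nt := by
        have h1 : ((i : Int) + 1) ≤ Nt / step := by omega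
        have h2 := mul_le_mul_of_nonneg_right h1 (le_of_lt hstep)
        nlinarith
      have hle' : (i : Int) * step + step ≤ Nt := by nlinarith
      simp only [Prod.mk.injEq]
      refine ⟨by ring, ?_⟩
      rw [min_eq_left hle']
      ring
    · have hcast : (((Nt / step).toNat : Int)) = Nt / step := by omega
      have hge : Nt ≤ ((Nt / step).toNat : Int) * step + step := by
        rw [hcast]; nlinarith
      simp only [List.map_cons, List.map_nil]
      rw [min_eq_right hge, hcast]
  · -- clamp never reached: all n chunks are full
    have hmeq : min n ((Nt / step).toNat + 1) = n := by omega
    have hmin : min n (Nt / step - 0).toNat = n := by omega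
    rw [if_neg (by omega), hmin, hmeq, List.append_nil]
    apply List.map_congr_left
    intro i hi
    have hiq : i < n := List.mem_range.mp hi
    have hle : ((i : Int) + 1) * step ≤ Nt := by
      have h1 : ((i : Int) + 1) ≤ Nt / step := by omega
      have h2 := mul_le_mul_of_nonneg_right h1 (le_of_lt hstep)
      nlinarith
    have hle' : (i : Int) * step + step ≤ Nt := by nlinarith
    simp only [Prod.mk.injEq]
    refine ⟨by ring, ?_⟩
    rw [min_eq_left hle']
    ring

-- ===== VERDICT (by name: the statement is the Claim_ definition above) =====
theorem get_start_stop_chunk_spec : Claim_unchanged_get_start_stop_chunk := by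
  intro Nt Nchunk _ hpre hnd
  unfold Pre_get_start_stop_chunk at hpre
  unfold D_get_start_stop_chunk at hnd
  by_cases hneg : Nchunk ≤ 0
  · -- range(Nchunk) is empty: A's loop never runs; B emits no chunks either
    have h0 : Nchunk.toNat = 0 := by omega
    have hA : get_start_stop_chunk Nt Nchunk = [] := by
      simp [get_start_stop_chunk, h0, goA]
    rw [hA]
    unfold get_start_stop_chunk_alt
    by_cases hs : bStep Nt Nchunk ≤ 0
    · rw [if_pos hs]
    · rw [if_neg hs]
      have hcnt : (bNchunks Nt Nchunk).toNat = 0 := by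
        unfold bNchunks; omega
      simp [bStarts, hcnt]
  · have hNc : 0 < Nchunk := by omega
    have hNt : 0 ≤ Nt := by by_contra h; exact hnd ⟨by omega, hNc⟩
    have htd : Nt.tdiv Nchunk = Nt / Nchunk := Int.tdiv_eq_ediv_of_nonneg hNt
    have hstep : 0 < bStep Nt Nchunk := by
      have h2 : 0 ≤ Nt / Nchunk := Int.ediv_nonneg hNt (by omega)
      unfold bStep; omega
    rw [alt_eq_map Nt Nchunk hstep]
    have hfd : PySem.Int.floordiv Nt (bStep Nt Nchunk) = Nt / bStep Nt Nchunk :=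
      PySem.Int.floordiv_eq_ediv_of_pos hstep
    have hq0 : 0 ≤ Nt / bStep Nt Nchunk := Int.ediv_nonneg hNt (le_of_lt hstep)
    have hcnt : (bNchunks Nt Nchunk).toNat
        = min Nchunk.toNat ((Nt / bStep Nt Nchunk).toNat + 1) := by
      unfold bNchunks; rw [hfd]; omega
    rw [hcnt]
    exact loop_eq_comprehension Nt (bStep Nt Nchunk) hNt hstep Nchunk.toNat

theorem get_start_stop_chunk_changed : Claim_changed_get_start_stop_chunk := by
  unfold Claim_changed_get_start_stop_chunk; decide

theorem get_start_stop_chunk_tight : Claim_exact_get_start_stop_chunk := by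
  intro Nt Nchunk _ _ hd
  unfold D_get_start_stop_chunk at hd
  obtain ⟨hNt, hNc⟩ := hd
  -- B emits no chunks: a nonpositive step, or a nonpositive chunk count
  have hB : get_start_stop_chunk_alt Nt Nchunk = [] := by
    unfold get_start_stop_chunk_alt
    by_cases hs : bStep Nt Nchunk ≤ 0
    · rw [if_pos hs]
    · rw [if_neg hs]
      have hqneg : Nt / bStep Nt Nchunk < 0 := Int.ediv_neg_of_neg_of_pos hNt (by omega)
      have hfd : PySem.Int.floordiv Nt (bStep Nt Nchunk) = Nt / bStep Nt Nchunk :=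
        PySem.Int.floordiv_eq_ediv_of_pos (by omega)
      have hcnt : (bNchunks Nt Nchunk).toNat = 0 := by
        unfold bNchunks; rw [hfd]; omega
      simp [bStarts, hcnt]
  -- A clamps immediately: step > Nt, so the first iteration already breaks
  have hstep : 0 + (Nt.tdiv Nchunk + 1) > Nt := by
    have h1 : (-Nt).tdiv Nchunk = (-Nt) / Nchunk := Int.tdiv_eq_ediv_of_nonneg (by omega)
    have h2 : (-Nt) / Nchunk ≤ -Nt := Int.ediv_le_self _ (by omega)
    have h3 : Nt.tdiv Nchunk = -((-Nt) / Nchunk) := by rw [← h1, Int.neg_tdiv, neg_neg]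
    omega
  have hA : get_start_stop_chunk Nt Nchunk = [(0, Nt)] := by
    obtain ⟨n, hn⟩ : ∃ n, Nchunk.toNat = n + 1 := ⟨Nchunk.toNat - 1, by omega⟩
    unfold get_start_stop_chunk
    rw [hn]
    simp only [goA]
    rw [if_pos hstep]
  rw [hA, hB]
  simp
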